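-- pv_equiv track=rewrite | github.com/saijonov/yandex-contest | solutions/solution-f.py | count_good_subarrays
-- ===== SOURCE A (Python) =====
-- def count_good_subarrays(n, arr):
--     count = 0
--     diff = 0
--     diff_count = {0: 1}
--
--     for i in range(n):
--         if i % 2 == 0:
--             diff += arr[i]
--         else:
--             diff -= arr[i]
--
--         count += diff_count.get(diff, 0)
--         diff_count[diff] = diff_count.get(diff, 0) + 1
--
--     return count
-- ===== SOURCE B (Python) =====
-- def count_good_subarrays(n, arr):
--     count = 0
--     for l in range(n):
--         s = 0
--         for r in range(l, n):
--             if r % 2 == 0: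
--                 s += arr[r]
--             else:
--                 s -= arr[r]
--             if s == 0:
--                 count += 1
--     return count
-- ===== Notes on version B (the rewrite author's own statement) =====
-- stated objective: alternative
-- what changed: The O(n) prefix-difference hashmap is replaced by a brute-force double loop: for each start l a fresh running alternating sum over r (sign tied to the absolute index r) is tested against zero, with no prefix array and no dictionary at all.
import Mathlib
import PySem

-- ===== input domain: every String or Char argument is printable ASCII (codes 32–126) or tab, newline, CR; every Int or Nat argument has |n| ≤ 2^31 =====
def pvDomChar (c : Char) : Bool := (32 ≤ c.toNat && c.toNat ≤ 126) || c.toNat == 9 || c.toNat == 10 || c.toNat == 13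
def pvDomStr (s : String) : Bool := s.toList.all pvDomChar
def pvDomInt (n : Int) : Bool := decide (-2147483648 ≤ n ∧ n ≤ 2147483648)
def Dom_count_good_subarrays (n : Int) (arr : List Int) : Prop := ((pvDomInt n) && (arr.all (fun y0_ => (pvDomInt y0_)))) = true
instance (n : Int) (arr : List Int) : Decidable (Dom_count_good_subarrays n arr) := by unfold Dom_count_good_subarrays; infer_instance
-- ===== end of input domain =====

-- B replaces the one-pass prefix-difference hashmap by a brute-force double loop over all subarrays (sign tied to the absolute index r), trading O(n) for O(n^2) simplicity with no dictionary.

-- ===== PORT A =====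
def count_good_subarrays (n : Int) (arr : List Int) : Int :=
  ((PySem.List.pyRange 0 n 1).foldl
    (fun (st : Int × Int × PySem.Dict Int Int) i =>
      let diff := if PySem.Int.mod i 2 == 0 then st.2.1 + PySem.List.pyGetD arr i 0
                  else st.2.1 - PySem.List.pyGetD arr i 0
      (st.1 + st.2.2.getD diff 0, diff, st.2.2.insert diff (st.2.2.getD diff 0 + 1)))
    (0, 0, PySem.Dict.empty.insert 0 1)).1

-- ===== PORT B =====
def count_good_subarrays_alt (n : Int) (arr : List Int) : Int :=
  (PySem.List.pyRange 0 n 1).foldl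
    (fun count l =>
      ((PySem.List.pyRange l n 1).foldl
        (fun (st : Int × Int) r =>
          let s := if PySem.Int.mod r 2 == 0 then st.2 + PySem.List.pyGetD arr r 0
                   else st.2 - PySem.List.pyGetD arr r 0
          (if s == 0 then st.1 + 1 else st.1, s))
        (count, 0)).1)
    0

-- ===== PRECONDITION & SPEC =====
-- Pre_ excludes exactly the inputs where Python A raises IndexError: n larger than len(arr).
def Pre_count_good_subarrays (n : Int) (arr : List Int) : Prop := n ≤ (arr.length : Int)
instance (n : Int) (arr : List Int) : Decidable (Pre_count_good_subarrays n arr) := by unfold Pre_count_good_subarrays; infer_instance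
def pvWitness_count_good_subarrays : Int × List Int := (4, [1, 1, 2, 2])

def Spec_count_good_subarrays (n : Int) (arr : List Int) (out : Int) : Prop := out = count_good_subarrays_alt n arr
instance (n : Int) (arr : List Int) (out : Int) : Decidable (Spec_count_good_subarrays n arr out) := by unfold Spec_count_good_subarrays; infer_instance

-- ===== CLAIM (what is proved, stated in full; the proofs are below) =====
def Claim_equal_count_good_subarrays : Prop := ∀ (n : Int) (arr : List Int), Dom_count_good_subarrays n arr → Pre_count_good_subarrays n arr → Spec_count_good_subarrays n arr (count_good_subarrays n arr)

-- ===== LEMMAS AND PROOFS =====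

-- signed prefix sums P(m) = arr[0] - arr[1] + arr[2] - … (m terms)
def pvPref (arr : List Int) : Nat → Int
  | 0 => 0
  | m + 1 => if m % 2 == 0 then pvPref arr m + arr.getD m 0 else pvPref arr m - arr.getD m 0

-- how often value k occurs among P(0), …, P(t-1)
def pvCnt (arr : List Int) (t : Nat) (k : Int) : Int :=
  ∑ j ∈ Finset.range t, if pvPref arr j = k then 1 else 0

lemma pvMod2 (m : Nat) : (PySem.Int.mod (m : Int) 2 == 0) = (m % 2 == 0) := by
  rw [PySem.Int.mod_eq_emod_of_pos (by norm_num)]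
  have h2 : (m : Int) % 2 = ((m % 2 : Nat) : Int) := by push_cast; ring
  rw [h2]
  rcases Nat.mod_two_eq_zero_or_one m with h | h <;> simp [h]

lemma pvA_loop (arr : List Int) (N : Nat) :
    ∃ d : PySem.Dict Int Int,
      ((PySem.List.pyRange 0 (N : Int) 1).foldl
        (fun (st : Int × Int × PySem.Dict Int Int) i =>
          let diff := if PySem.Int.mod i 2 == 0 then st.2.1 + PySem.List.pyGetD arr i 0
                      else st.2.1 - PySem.List.pyGetD arr i 0
          (st.1 + st.2.2.getD diff 0, diff, st.2.2.insert diff (st.2.2.getD diff 0 + 1)))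
        (0, 0, PySem.Dict.empty.insert 0 1))
      = (∑ i ∈ Finset.range N, pvCnt arr (i + 1) (pvPref arr (i + 1)), pvPref arr N, d)
      ∧ ∀ k, d.getD k 0 = pvCnt arr (N + 1) k := by
  induction N with
  | zero =>
      refine ⟨PySem.Dict.empty.insert 0 1, ?_, ?_⟩
      · simp [pvPref]
      · intro k
        rw [PySem.Dict.getD_insert, pvCnt, Finset.sum_range_one]
        simp only [pvPref]
        rcases eq_or_ne k 0 with h | h
        · subst h; simp
        · rw [if_neg h, if_neg (Ne.symm h), PySem.Dict.getD_empty]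
  | succ N ih =>
      obtain ⟨d, hstate, hd⟩ := ih
      have hr : PySem.List.pyRange 0 ((N + 1 : Nat) : Int) 1
          = PySem.List.pyRange 0 (N : Int) 1 ++ [(N : Int)] := by
        push_cast
        exact PySem.List.pyRange_one_succ_right (by positivity)
      rw [hr, List.foldl_append, hstate]
      have hdiff : (if PySem.Int.mod (N : Int) 2 == 0
            then pvPref arr N + PySem.List.pyGetD arr (N : Int) 0
            else pvPref arr N - PySem.List.pyGetD arr (N : Int) 0) = pvPref arr (N + 1) := by
        rw [pvMod2]
        simp [pvPref]
      refine ⟨d.insert (pvPref arr (N + 1)) (d.getD (pvPref arr (N + 1)) 0 + 1), ?_, ?_⟩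
      · simp only [List.foldl_cons, List.foldl_nil, hdiff, hd]
        rw [Finset.sum_range_succ]
      · intro k
        rw [PySem.Dict.getD_insert]
        have hsucc : pvCnt arr (N + 1 + 1) k
            = pvCnt arr (N + 1) k + (if pvPref arr (N + 1) = k then 1 else 0) := by
          rw [pvCnt, pvCnt, Finset.sum_range_succ]
        by_cases hk : k = pvPref arr (N + 1)
        · subst hk
          rw [if_pos rfl, hd, hsucc, if_pos rfl]
        · rw [if_neg hk, hd, hsucc, if_neg (Ne.symm hk), add_zero]

-- B's inner loop starting at l with bound N: the running sum after r is P(r+1) - P(l),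
-- and the count grows by the number of r in [l, N) with P(r+1) = P(l)
lemma pvB_inner (arr : List Int) (l : Nat) (N : Nat) (h : l ≤ N) (c : Int) :
    (PySem.List.pyRange (l : Int) (N : Int) 1).foldl
      (fun (st : Int × Int) r =>
        let s := if PySem.Int.mod r 2 == 0 then st.2 + PySem.List.pyGetD arr r 0
                 else st.2 - PySem.List.pyGetD arr r 0
        (if s == 0 then st.1 + 1 else st.1, s))
      (c, 0)
    = (c + ∑ r ∈ Finset.Ico l N, (if pvPref arr (r + 1) = pvPref arr l then 1 else 0),
       pvPref arr N - pvPref arr l) := by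
  induction N, h using Nat.le_induction with
  | base =>
      rw [PySem.List.pyRange_one_eq_nil (by omega)]
      simp
  | succ N hlN ih =>
      have hr : PySem.List.pyRange (l : Int) ((N + 1 : Nat) : Int) 1
          = PySem.List.pyRange (l : Int) (N : Int) 1 ++ [(N : Int)] := by
        push_cast
        exact PySem.List.pyRange_one_succ_right (by exact_mod_cast hlN)
      rw [hr, List.foldl_append, ih]
      have hs : (if PySem.Int.mod (N : Int) 2 == 0
            then pvPref arr N - pvPref arr l + PySem.List.pyGetD arr (N : Int) 0
            else pvPref arr N - pvPref arr l - PySem.List.pyGetD arr (N : Int) 0)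
          = pvPref arr (N + 1) - pvPref arr l := by
        rw [pvMod2]
        simp only [pvPref]
        split_ifs <;> simp <;> ring
      simp only [List.foldl_cons, List.foldl_nil, hs]
      rw [Finset.sum_Ico_succ_top hlN]
      have hcond : ((pvPref arr (N + 1) - pvPref arr l == 0) = true)
          ↔ pvPref arr (N + 1) = pvPref arr l := by
        constructor
        · intro hb; have := of_decide_eq_true hb; omega
        · intro hb; exact decide_eq_true (by omega)
      by_cases hc : pvPref arr (N + 1) = pvPref arr l
      · rw [if_pos (hcond.mpr hc), if_pos hc]
        refine Prod.ext ?_ rfl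
        push_cast; ring
      · rw [if_neg (fun hb => hc (hcond.mp hb)), if_neg hc]
        refine Prod.ext ?_ rfl
        push_cast; ring

-- B's outer loop, with the inner loop replaced by its value, is a plain sum
lemma pvB_outer_aux (arr : List Int) (N : Nat) (t : Nat) (h : t ≤ N) :
    (List.map (fun k : Nat => (k : Int)) (List.range t)).foldl
      (fun count l =>
        ((PySem.List.pyRange l (N : Int) 1).foldl
          (fun (st : Int × Int) r =>
            let s := if PySem.Int.mod r 2 == 0 then st.2 + PySem.List.pyGetD arr r 0
                     else st.2 - PySem.List.pyGetD arr r 0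
            (if s == 0 then st.1 + 1 else st.1, s))
          (count, 0)).1)
      0
    = ∑ l ∈ Finset.range t, ∑ r ∈ Finset.Ico l N,
        (if pvPref arr (r + 1) = pvPref arr l then 1 else 0 : Int) := by
  induction t with
  | zero => simp
  | succ t ih =>
      have ht : t ≤ N := Nat.le_of_succ_le h
      rw [List.range_succ, List.map_append, List.foldl_append, ih ht]
      simp only [List.map_cons, List.map_nil, List.foldl_cons, List.foldl_nil]
      rw [pvB_inner arr t N ht, Finset.sum_range_succ]

lemma pvB_outer (arr : List Int) (N : Nat) :
    count_good_subarrays_alt (N : Int) arr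
    = ∑ l ∈ Finset.range N, ∑ r ∈ Finset.Ico l N,
        (if pvPref arr (r + 1) = pvPref arr l then 1 else 0 : Int) := by
  unfold count_good_subarrays_alt
  rw [PySem.List.pyRange_zero_natCast]
  exact pvB_outer_aux arr N N (le_refl N)

-- double-counting: summing matches backwards (A) equals summing forwards (B)
lemma pvSwap (N : Nat) (g : Nat → Nat → Int) :
    ∑ i ∈ Finset.range N, ∑ j ∈ Finset.range (i + 1), g j i
    = ∑ l ∈ Finset.range N, ∑ r ∈ Finset.Ico l N, g l r := by
  induction N with
  | zero => simp
  | succ N ih =>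
      have step : ∀ l ∈ Finset.range N,
          (∑ r ∈ Finset.Ico l (N + 1), g l r) = (∑ r ∈ Finset.Ico l N, g l r) + g l N := by
        intro l hl
        exact Finset.sum_Ico_succ_top (Nat.le_of_lt (Finset.mem_range.mp hl)) _
      have hRHS : ∑ l ∈ Finset.range (N + 1), ∑ r ∈ Finset.Ico l (N + 1), g l r
          = (∑ l ∈ Finset.range N, ∑ r ∈ Finset.Ico l N, g l r)
            + ∑ j ∈ Finset.range (N + 1), g j N := by
        rw [Finset.sum_range_succ, Finset.sum_congr rfl step, Finset.sum_add_distrib,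
          Finset.sum_Ico_succ_top (le_refl N), Finset.Ico_self, Finset.sum_empty, zero_add,
          Finset.sum_range_succ]
        ring
      rw [Finset.sum_range_succ, ih, hRHS]

-- ===== VERDICT (by name: the statement is the Claim_ definition above) =====
theorem count_good_subarrays_spec : Claim_equal_count_good_subarrays := by
  intro n arr _ _
  unfold Spec_count_good_subarrays
  by_cases hn : 0 ≤ n
  · obtain ⟨N, rfl⟩ : ∃ N : Nat, n = (N : Int) := ⟨n.toNat, (Int.toNat_of_nonneg hn).symm⟩
    unfold count_good_subarrays
    obtain ⟨d, hstate, _⟩ := pvA_loop arr N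
    rw [hstate, pvB_outer]
    dsimp only
    simp only [pvCnt]
    rw [pvSwap N (fun j i => if pvPref arr j = pvPref arr (i + 1) then 1 else 0)]
    refine Finset.sum_congr rfl (fun l _ => Finset.sum_congr rfl (fun r _ => ?_))
    simp [eq_comm]
  · unfold count_good_subarrays count_good_subarrays_alt
    rw [PySem.List.pyRange_one_eq_nil (by omega)]
    rfl
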